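-- pv_equiv track=rewrite | github.com/sloppymo/years-of-lead | willow_tier_flow_control.py | _populate_template
-- ===== SOURCE A (Python) =====
-- from typing import Dict, List, Optional, Tuple
--
-- def _populate_template(template: str, message: str, emotional_state: Dict) -> str:
--     """Fill template with appropriate content"""
--     # This would be more sophisticated in production
--     replacements = {
--         "{validation}": "Your frustration is completely valid",
--         "{acknowledgment}": "This situation is unacceptable",
--         "{grounding}": "breathe through this",
--         "{somatic_cue}": "your feet on the floor",
--         "{action_steps}": "1. Text HEAT for emergency team\n2. Reply SHELTER for warm space\n3. Text STATUS for updates"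
--     }
--
--     for key, value in replacements.items():
--         template = template.replace(key, value)
--
--     return template
-- ===== SOURCE B (Python) =====
-- def _populate_template(template: str, message: str, emotional_state) -> str:
--     """Fill template with appropriate content (single left-to-right scan)."""
--     replacements = {
--         "{validation}": "Your frustration is completely valid",
--         "{acknowledgment}": "This situation is unacceptable",
--         "{grounding}": "breathe through this",
--         "{somatic_cue}": "your feet on the floor",
--         "{action_steps}": "1. Text HEAT for emergency team\n2. Reply SHELTER for warm space\n3. Text STATUS for updates"
--     }
--     out = []
--     i = 0
--     n = len(template)
--     while i < n:
--         for key, value in replacements.items():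
--             if template.startswith(key, i):
--                 out.append(value)
--                 i += len(key)
--                 break
--         else:
--             out.append(template[i])
--             i += 1
--     return "".join(out)
-- ===== Notes on version B (the rewrite author's own statement) =====
-- stated objective: alternative
-- what changed: B replaces A's five sequential whole-string .replace passes with one left-to-right scan that, at each position, matches a placeholder key and emits its value (equal because no key overlaps another key or any value).
import Mathlib
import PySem

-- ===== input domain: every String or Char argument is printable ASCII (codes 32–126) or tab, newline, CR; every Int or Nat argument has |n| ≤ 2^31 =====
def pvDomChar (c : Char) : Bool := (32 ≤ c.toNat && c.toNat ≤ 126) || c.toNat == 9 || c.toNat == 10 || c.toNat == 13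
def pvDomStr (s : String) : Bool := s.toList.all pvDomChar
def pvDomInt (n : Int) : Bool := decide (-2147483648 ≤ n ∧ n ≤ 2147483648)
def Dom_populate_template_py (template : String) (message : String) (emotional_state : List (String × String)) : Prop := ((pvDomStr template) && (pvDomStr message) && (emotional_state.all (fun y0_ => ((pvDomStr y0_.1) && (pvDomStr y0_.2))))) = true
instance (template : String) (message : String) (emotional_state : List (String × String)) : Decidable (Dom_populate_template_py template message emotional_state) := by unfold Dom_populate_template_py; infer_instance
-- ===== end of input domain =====

-- B replaces A's five sequential whole-string .replace passes with one left-to-right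
-- scan emitting values at key matches (alternative decomposition, not claimed faster).


-- ===== PORT A =====
-- A's literal `replacements` dict, as an association list in insertion order.
def pvReplacements : List (String × String) :=
  [("{validation}", "Your frustration is completely valid"),
   ("{acknowledgment}", "This situation is unacceptable"),
   ("{grounding}", "breathe through this"),
   ("{somatic_cue}", "your feet on the floor"),
   ("{action_steps}", "1. Text HEAT for emergency team\n2. Reply SHELTER for warm space\n3. Text STATUS for updates")]

-- for key, value in replacements.items(): template = template.replace(key, value)
def populate_template_py (template : String) (message : String) (emotional_state : List (String × String)) : String :=
  pvReplacements.foldl (fun t kv => PySem.Str.replace t kv.1 kv.2) template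

-- ===== PORT B =====
-- B's `replacements`, at the character-list level
def pvKV : List (List Char × List Char) :=
  [("{validation}".toList, "Your frustration is completely valid".toList),
   ("{acknowledgment}".toList, "This situation is unacceptable".toList),
   ("{grounding}".toList, "breathe through this".toList),
   ("{somatic_cue}".toList, "your feet on the floor".toList),
   ("{action_steps}".toList, "1. Text HEAT for emergency team\n2. Reply SHELTER for warm space\n3. Text STATUS for updates".toList)]

-- the inner `for key, value … if template.startswith(key, i): break / else:` loop
def pvScanFind : List (List Char × List Char) → List Char → Option (List Char × List Char)
  | [], _ => none
  | (k, v) :: ps, cs => if k.isPrefixOf cs then some (k, v) else pvScanFind ps cs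

-- the outer `while i < n` loop of B: one left-to-right scan
def pvScanB : List Char → List Char
  | [] => []
  | c :: rest =>
    match pvScanFind pvKV (c :: rest) with
    | some (k, v) => v ++ pvScanB (rest.drop (k.length - 1))
    | none => c :: pvScanB rest
termination_by cs => cs.length
decreasing_by
  all_goals (simp [List.length_drop]; try omega)

def populate_template_py_alt (template : String) (message : String) (emotional_state : List (String × String)) : String :=
  String.ofList (pvScanB template.toList)

-- ===== PRECONDITION & SPEC =====
def Spec_populate_template_py (template : String) (message : String) (emotional_state : List (String × String)) (out : String) : Prop := out = populate_template_py_alt template message emotional_state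
instance (template : String) (message : String) (emotional_state : List (String × String)) (out : String) : Decidable (Spec_populate_template_py template message emotional_state out) := by unfold Spec_populate_template_py; infer_instance

-- ===== CLAIM (what is proved, stated in full; the proofs are below) =====
def Claim_equal_populate_template_py : Prop := ∀ (template : String) (message : String) (emotional_state : List (String × String)), Dom_populate_template_py template message emotional_state → Spec_populate_template_py template message emotional_state (populate_template_py template message emotional_state)

-- ===== LEMMAS AND PROOFS =====

-- structural characterization of PySem.Chars.replace (for nonempty `old`)
def pvRep (old new : List Char) : List Char → List Char
  | [] => []
  | c :: t => if old.isPrefixOf (c :: t) then new ++ pvRep old new (t.drop (old.length - 1)) else c :: pvRep old new t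
termination_by l => l.length
decreasing_by
  all_goals (simp [List.length_drop]; try omega)

theorem pvGo_eq (old new : List Char) (hold : old ≠ []) :
    ∀ fuel l acc, l.length ≤ fuel →
      PySem.Chars.replace.go old new fuel l acc = acc.reverse ++ pvRep old new l := by
  intro fuel
  induction fuel with
  | zero =>
    intro l acc hl
    have : l = [] := by cases l <;> simp_all
    subst this
    simp [PySem.Chars.replace.go, pvRep]
  | succ n ih =>
    intro l acc hl
    cases l with
    | nil => simp [PySem.Chars.replace.go, pvRep]
    | cons c t =>
      rw [PySem.Chars.replace.go]
      by_cases hp : old.isPrefixOf (c :: t)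
      · simp only [hp, if_true]
        have hlen : 1 ≤ old.length := by cases old <;> simp_all
        have hdrop : (c :: t).drop old.length = t.drop (old.length - 1) := by
          obtain ⟨m, hm⟩ : ∃ m, old.length = m + 1 := ⟨old.length - 1, by omega⟩
          simp [hm]
        have hd : (t.drop (old.length - 1)).length ≤ n := by
          simp only [List.length_drop]
          simp at hl; omega
        rw [hdrop, ih _ _ hd]
        rw [pvRep]
        simp [hp]
      · simp only [hp, if_false]
        have : t.length ≤ n := by simp at hl; omega
        rw [ih _ _ this]
        rw [pvRep]
        simp [hp]

theorem pvReplace_eq (s old new : List Char) (h : old ≠ []) :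
    PySem.Chars.replace s old new = pvRep old new s := by
  rw [PySem.Chars.replace]
  have : old.isEmpty = false := by cases old <;> simp_all
  rw [this]
  simpa using pvGo_eq old new h s.length s [] (le_refl _)

theorem pvRep_cons_not (old new : List Char) (c : Char) (t : List Char)
    (h : ¬ old <+: (c :: t)) : pvRep old new (c :: t) = c :: pvRep old new t := by
  rw [pvRep]; simp [List.isPrefixOf_iff_prefix, h]

theorem pvRep_prefix (old new b : List Char) (h : old ≠ []) :
    pvRep old new (old ++ b) = new ++ pvRep old new b := by
  cases old with
  | nil => simp_all
  | cons o ot =>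
    rw [List.cons_append, pvRep]
    have hp : (o :: ot).isPrefixOf (o :: (ot ++ b)) := by
      rw [List.isPrefixOf_iff_prefix]
      exact ⟨b, by simp⟩
    simp only [hp, if_true]
    congr 1
    congr 1
    simp

theorem pvRep_pass (old new : List Char) (hk : old.head? = some '{') :
    ∀ w b, (∀ c ∈ w, c ≠ '{') → pvRep old new (w ++ b) = w ++ pvRep old new b := by
  intro w
  induction w with
  | nil => simp
  | cons c w' ih =>
    intro b hw
    have hnp : ¬ old <+: (c :: (w' ++ b)) := by
      intro hp
      cases old with
      | nil => simp at hk
      | cons o ot =>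
        simp at hk
        rw [List.cons_prefix_cons] at hp
        exact hw c (by simp) (by rw [← hp.1, hk])
    rw [List.cons_append, pvRep_cons_not _ _ _ _ hnp, ih b (fun x hx => hw x (by simp [hx]))]
    simp

theorem pvNoPrefixExt : ∀ (a b X : List Char), ¬ a <+: b → ¬ b <+: a → ¬ a <+: (b ++ X) := by
  intro a
  induction a with
  | nil => intro b X h1 _ _; exact h1 (List.nil_prefix)
  | cons x a' ih =>
    intro b X h1 h2
    cases b with
    | nil => exact absurd (List.nil_prefix) h2
    | cons y b' =>
      intro hp
      rw [List.cons_append, List.cons_prefix_cons] at hp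
      obtain ⟨hxy, hp'⟩ := hp
      subst hxy
      exact ih b' X (fun h => h1 (List.cons_prefix_cons.mpr ⟨rfl, h⟩))
        (fun h => h2 (List.cons_prefix_cons.mpr ⟨rfl, h⟩)) hp'

-- decidable facts about the concrete key/value pairs
def pvGood (c : Char) : Bool :=
  !(c == '{') && !(c == 'Y') && !(c == 'T') && !(c == 'b') && !(c == 'y') && !(c == '1')

theorem pvKV_shape : ∀ kv ∈ pvKV, kv.1.head? = some '{' ∧ kv.1.tail ≠ [] ∧
    kv.1.tail.all (fun c => !(c == '{')) = true ∧ kv.2.all (fun c => !(c == '{')) = true ∧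
    kv.1.tail.all pvGood = true ∧ (kv.2.head?.map pvGood) = some false := by decide

theorem pvKV_nopref : ∀ p ∈ pvKV, ∀ q ∈ pvKV, p.1 ≠ q.1 → ¬ p.1 <+: q.1 := by decide

theorem pvKV_unique : ∀ p ∈ pvKV, ∀ q ∈ pvKV, p.1 = q.1 → p.2 = q.2 := by decide

theorem pvKV_ne_nil : ∀ kv ∈ pvKV, kv.1 ≠ [] := by decide

-- tokenization: the scan's decisions, recorded
inductive PvTok where
  | lit : Char → PvTok
  | key : List Char → List Char → PvTok
deriving DecidableEq, Repr

def pvToks : List Char → List PvTok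
  | [] => []
  | c :: rest =>
    match pvScanFind pvKV (c :: rest) with
    | some (k, v) => .key k v :: pvToks (rest.drop (k.length - 1))
    | none => .lit c :: pvToks rest
termination_by cs => cs.length
decreasing_by
  all_goals (simp [List.length_drop]; try omega)

def pvEmitT (S : List (List Char)) : PvTok → List Char
  | .lit c => [c]
  | .key k v => if k ∈ S then v else k

def pvEmit (S : List (List Char)) (ts : List PvTok) : List Char := ts.flatMap (pvEmitT S)

theorem pvEmit_cons (S : List (List Char)) (t : PvTok) (ts : List PvTok) :
    pvEmit S (t :: ts) = pvEmitT S t ++ pvEmit S ts := by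
  simp [pvEmit]

theorem pvToks_some (c : Char) (rest k v : List Char) (h : pvScanFind pvKV (c :: rest) = some (k, v)) :
    pvToks (c :: rest) = .key k v :: pvToks (rest.drop (k.length - 1)) := by
  rw [pvToks, h]

theorem pvToks_none (c : Char) (rest : List Char) (h : pvScanFind pvKV (c :: rest) = none) :
    pvToks (c :: rest) = .lit c :: pvToks rest := by
  rw [pvToks, h]

theorem pvScanB_some (c : Char) (rest k v : List Char) (h : pvScanFind pvKV (c :: rest) = some (k, v)) :
    pvScanB (c :: rest) = v ++ pvScanB (rest.drop (k.length - 1)) := by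
  rw [pvScanB, h]

theorem pvScanB_none (c : Char) (rest : List Char) (h : pvScanFind pvKV (c :: rest) = none) :
    pvScanB (c :: rest) = c :: pvScanB rest := by
  rw [pvScanB, h]

theorem pvScanFind_some : ∀ (ps : List (List Char × List Char)) cs k v,
    pvScanFind ps cs = some (k, v) → (k, v) ∈ ps ∧ k <+: cs := by
  intro ps
  induction ps with
  | nil => intro cs k v h; simp [pvScanFind] at h
  | cons p ps' ih =>
    intro cs k v h
    obtain ⟨pk, pv⟩ := p
    rw [pvScanFind] at h
    by_cases hp : pk.isPrefixOf cs
    · simp [hp] at h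
      exact ⟨by simp [h.1, h.2], by rw [← h.1]; exact (List.isPrefixOf_iff_prefix).mp hp⟩
    · simp [hp] at h
      obtain ⟨hm, hpre⟩ := ih cs k v h
      exact ⟨by simp [hm], hpre⟩

theorem pvScanFind_none : ∀ (ps : List (List Char × List Char)) cs,
    pvScanFind ps cs = none → ∀ kv ∈ ps, ¬ kv.1 <+: cs := by
  intro ps
  induction ps with
  | nil => intro cs _ kv hm; simp at hm
  | cons p ps' ih =>
    intro cs h kv hm
    obtain ⟨pk, pv⟩ := p
    rw [pvScanFind] at h
    by_cases hp : pk.isPrefixOf cs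
    · simp [hp] at h
    · simp [hp] at h
      rcases List.mem_cons.mp hm with hm | hm
      · subst hm; simpa [List.isPrefixOf_iff_prefix] using hp
      · exact ih cs h kv hm

-- if the scan matches key k at c :: rest, the input decomposes as k ++ (rest.drop (k.length - 1))
theorem pvScan_decomp (c : Char) (rest k v : List Char)
    (h : pvScanFind pvKV (c :: rest) = some (k, v)) :
    c :: rest = k ++ rest.drop (k.length - 1) := by
  obtain ⟨hm, hpre⟩ := pvScanFind_some pvKV _ k v h
  have hne : k ≠ [] := pvKV_ne_nil _ hm
  obtain ⟨t, ht⟩ := hpre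
  have hdrop : (c :: rest).drop k.length = t := by rw [← ht]; simp
  have hlen : 1 ≤ k.length := by cases k <;> simp_all
  have : (c :: rest).drop k.length = rest.drop (k.length - 1) := by
    obtain ⟨m, hm'⟩ : ∃ m, k.length = m + 1 := ⟨k.length - 1, by omega⟩
    simp [hm']
  rw [this] at hdrop
  rw [← ht, hdrop]

-- a nonempty string of pvGood characters that prefixes the partially-replaced text prefixes the original
theorem pvTailPfx : ∀ (u : List Char) (S : List (List Char)) (w : List Char), w ≠ [] →
    (∀ c ∈ w, pvGood c = true) → w <+: pvEmit S (pvToks u) → w <+: u := by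
  intro u
  induction u using pvToks.induct with
  | case1 =>
    intro S w hw _ hp
    simp [pvToks, pvEmit] at hp
    exact absurd hp hw
  | case2 c rest k v h ih =>
    intro S w hw hg hp
    rw [pvToks_some c rest k v h] at hp
    exfalso
    obtain ⟨hm, _⟩ := pvScanFind_some pvKV _ k v h
    obtain ⟨hk1, _, _, _, _, hv1⟩ := pvKV_shape _ hm
    obtain ⟨wc, w', hwc⟩ : ∃ wc w', w = wc :: w' := by
      cases w with
      | nil => exact absurd rfl hw
      | cons a t => exact ⟨a, t, rfl⟩
    subst hwc
    rw [pvEmit_cons] at hp; simp only [pvEmitT] at hp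
    by_cases hS : k ∈ S
    · simp only [hS, if_true] at hp
      obtain ⟨vh, vt, hv⟩ : ∃ vh vt, v = vh :: vt := by
        cases v with
        | nil => simp at hv1
        | cons a t => exact ⟨a, t, rfl⟩
      subst hv
      rw [List.cons_append, List.cons_prefix_cons] at hp
      have h1 : pvGood vh = false := by simpa using hv1
      have h2 := hg wc (by simp)
      rw [hp.1] at h2
      rw [h2] at h1
      exact absurd h1 (by simp)
    · simp only [hS, if_false] at hp
      obtain ⟨kt, hk⟩ : ∃ kt, k = '{' :: kt := by
        cases hkc : k with
        | nil => rw [hkc] at hk1; simp at hk1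
        | cons a t =>
          have ha : a = '{' := by rw [hkc] at hk1; simpa using hk1
          exact ⟨t, by rw [ha]⟩
      rw [hk, List.cons_append, List.cons_prefix_cons] at hp
      have h2 := hg wc (by simp)
      rw [hp.1] at h2
      simp [pvGood] at h2
  | case3 c rest h ih =>
    intro S w hw hg hp
    rw [pvToks_none c rest h] at hp
    cases w with
    | nil => exact absurd rfl hw
    | cons wc w' =>
      rw [pvEmit_cons] at hp
      simp only [pvEmitT, List.singleton_append, List.cons_prefix_cons] at hp
      obtain ⟨hc, hp'⟩ := hp
      subst hc
      by_cases hw' : w' = []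
      · subst hw'
        exact List.cons_prefix_cons.mpr ⟨rfl, List.nil_prefix⟩
      · exact List.cons_prefix_cons.mpr
          ⟨rfl, ih S w' hw' (fun x hx => hg x (by simp [hx])) hp'⟩

-- the main step: one Python .replace pass over the partially-replaced text marks one more key
theorem pvKeyStep : ∀ (u : List Char) (S : List (List Char)) (kj vj : List Char),
    (kj, vj) ∈ pvKV → kj ∉ S →
    pvRep kj vj (pvEmit S (pvToks u)) = pvEmit (kj :: S) (pvToks u) := by
  intro u
  induction u using pvToks.induct with
  | case1 => intro S kj vj _ _; simp [pvToks, pvEmit, pvRep]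
  | case2 c rest k v h ih =>
    intro S kj vj hmj hSj
    obtain ⟨hm, _⟩ := pvScanFind_some pvKV _ k v h
    obtain ⟨hk1, _, hknb, hvnb, _, _⟩ := pvKV_shape _ hm
    obtain ⟨hj1, _, _, _, _, _⟩ := pvKV_shape _ hmj
    have hkne : k ≠ [] := pvKV_ne_nil _ hm
    rw [pvToks_some c rest k v h]
    rw [pvEmit_cons, pvEmit_cons]; simp only [pvEmitT]
    by_cases hkk : k = kj
    · subst hkk
      have hvv : v = vj := pvKV_unique _ hm _ hmj rfl
      subst hvv
      simp only [hSj, if_false, List.mem_cons, true_or, if_true]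
      rw [pvRep_prefix _ _ _ hkne, ih S k v hmj hSj]
    · by_cases hS : k ∈ S
      · simp only [hS, if_true, List.mem_cons, or_true]
        have hvg : ∀ x ∈ v, x ≠ '{' := by simpa using hvnb
        rw [pvRep_pass kj vj hj1 v _ hvg, ih S kj vj hmj hSj]
      · have hS' : k ∉ (kj :: S) := by simp [hS]; exact hkk
        simp only [hS, if_false, hS', if_false]
        obtain ⟨kt, hk⟩ : ∃ kt, k = '{' :: kt := by
          cases hkc : k with
          | nil => exact absurd hkc hkne
          | cons a t =>
            have ha : a = '{' := by rw [hkc] at hk1; simpa using hk1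
            exact ⟨t, by rw [ha]⟩
        subst hk
        have hnp : ¬ kj <+: (('{' :: kt) ++ pvEmit S (pvToks (rest.drop (('{' :: kt).length - 1)))) :=
          pvNoPrefixExt kj ('{' :: kt) _
            (pvKV_nopref _ hmj _ hm (fun hh => hkk hh.symm))
            (pvKV_nopref _ hm _ hmj hkk)
        rw [List.cons_append, pvRep_cons_not _ _ _ _ (by rw [← List.cons_append]; exact hnp)]
        have hktg : ∀ x ∈ kt, x ≠ '{' := by simpa using hknb
        rw [pvRep_pass kj vj hj1 kt _ hktg, ih S kj vj hmj hSj, List.cons_append]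
  | case3 c rest h ih =>
    intro S kj vj hmj hSj
    obtain ⟨hj1, hjt, _, _, hjg, _⟩ := pvKV_shape _ hmj
    have hjne := pvKV_ne_nil _ hmj
    obtain ⟨jt, hkj⟩ : ∃ jt, kj = '{' :: jt := by
      cases hc : kj with
      | nil => exact absurd hc hjne
      | cons a t =>
        have ha : a = '{' := by rw [hc] at hj1; simpa using hj1
        exact ⟨t, by rw [ha]⟩
    subst hkj
    rw [pvToks_none c rest h]
    rw [pvEmit_cons, pvEmit_cons]; simp only [pvEmitT, List.singleton_append]
    have hnone := pvScanFind_none pvKV _ h ('{' :: jt, vj) hmj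
    have hnp : ¬ ('{' :: jt) <+: (c :: pvEmit S (pvToks rest)) := by
      intro hp
      rw [List.cons_prefix_cons] at hp
      obtain ⟨hc, hp'⟩ := hp
      have hjtne : jt ≠ [] := by simpa using hjt
      have hjtg : ∀ x ∈ jt, pvGood x = true := by simpa using hjg
      have hpre := pvTailPfx rest S jt hjtne hjtg hp'
      exact hnone (by rw [← hc]; exact List.cons_prefix_cons.mpr ⟨rfl, hpre⟩)
    rw [pvRep_cons_not _ _ _ _ hnp, ih S _ vj hmj hSj]

-- reconstruction: with no key marked, the tokens spell the original input
theorem pvEmit_nil : ∀ u : List Char, pvEmit [] (pvToks u) = u := by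
  intro u
  induction u using pvToks.induct with
  | case1 => simp [pvToks, pvEmit]
  | case2 c rest k v h ih =>
    rw [pvToks_some c rest k v h]
    rw [pvEmit_cons]; simp only [pvEmitT, List.not_mem_nil, if_false]
    rw [ih]
    exact (pvScan_decomp c rest k v h).symm
  | case3 c rest h ih =>
    rw [pvToks_none c rest h]
    rw [pvEmit_cons]; simp only [pvEmitT, List.singleton_append]
    rw [ih]

-- with every key marked, the tokens spell B's scan output
theorem pvEmit_full : ∀ (u : List Char) (S : List (List Char)),
    (∀ kv ∈ pvKV, kv.1 ∈ S) → pvEmit S (pvToks u) = pvScanB u := by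
  intro u
  induction u using pvToks.induct with
  | case1 => intro S _; simp [pvToks, pvScanB, pvEmit]
  | case2 c rest k v h ih =>
    intro S hS
    obtain ⟨hm, _⟩ := pvScanFind_some pvKV _ k v h
    rw [pvToks_some c rest k v h, pvScanB_some c rest k v h]
    rw [pvEmit_cons]; simp only [pvEmitT, hS _ hm, if_true]
    rw [ih S hS]
  | case3 c rest h ih =>
    intro S hS
    rw [pvToks_none c rest h, pvScanB_none c rest h]
    rw [pvEmit_cons]; simp only [pvEmitT, List.singleton_append]
    rw [ih S hS]

-- membership / non-membership facts for the five chained steps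
theorem pvMem1 : (("{validation}" : String).toList, ("Your frustration is completely valid" : String).toList) ∈ pvKV := by decide
theorem pvMem2 : (("{acknowledgment}" : String).toList, ("This situation is unacceptable" : String).toList) ∈ pvKV := by decide
theorem pvMem3 : (("{grounding}" : String).toList, ("breathe through this" : String).toList) ∈ pvKV := by decide
theorem pvMem4 : (("{somatic_cue}" : String).toList, ("your feet on the floor" : String).toList) ∈ pvKV := by decide
theorem pvMem5 : (("{action_steps}" : String).toList, ("1. Text HEAT for emergency team\n2. Reply SHELTER for warm space\n3. Text STATUS for updates" : String).toList) ∈ pvKV := by decide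

-- ===== VERDICT (by name: the statement is the Claim_ definition above) =====
theorem populate_template_py_spec : Claim_equal_populate_template_py := by
  intro template message emotional_state _
  unfold Spec_populate_template_py populate_template_py populate_template_py_alt
  apply String.ext
  simp only [pvReplacements, List.foldl_cons, List.foldl_nil, PySem.Str.toList_replace,
    String.toList_ofList]
  rw [pvReplace_eq _ _ _ (by decide), pvReplace_eq _ _ _ (by decide),
    pvReplace_eq _ _ _ (by decide), pvReplace_eq _ _ _ (by decide),
    pvReplace_eq _ _ _ (by decide)]
  conv_lhs =>
    rw [(pvEmit_nil template.toList).symm]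
    rw [pvKeyStep _ [] _ _ pvMem1 (by decide)]
    rw [pvKeyStep _ _ _ _ pvMem2 (by decide)]
    rw [pvKeyStep _ _ _ _ pvMem3 (by decide)]
    rw [pvKeyStep _ _ _ _ pvMem4 (by decide)]
    rw [pvKeyStep _ _ _ _ pvMem5 (by decide)]
    rw [pvEmit_full _ _ (by decide)]
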